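-- pv_equiv track=rewrite | github.com/merneo/wapi | wapi/commands/contact.py | filter_sensitive_contact_data
-- ===== SOURCE A (Python) =====
-- from typing import Dict, Any
--
-- def filter_sensitive_contact_data(contact: Dict[str, Any]) -> Dict[str, Any]:
--     """
--     Filter out sensitive data from contact information.
--
--     Args:
--         contact: Contact data dictionary
--
--     Returns:
--         Filtered contact data without sensitive information
--     """
--     sensitive_fields = [
--         'email', 'email2', 'phone', 'fax', 'ident', 'ident_type',
--         'addr_street', 'addr_city', 'addr_zip', 'notify_email'
--     ]
--
--     filtered = contact.copy()
--     for field in sensitive_fields: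
--         if field in filtered:
--             filtered[field] = '[HIDDEN]'
--
--     return filtered
-- ===== SOURCE B (Python) =====
-- def filter_sensitive_contact_data(contact):
--     """Filtered copy of contact: sensitive fields replaced by '[HIDDEN]'."""
--     sensitive = {
--         'email', 'email2', 'phone', 'fax', 'ident', 'ident_type',
--         'addr_street', 'addr_city', 'addr_zip', 'notify_email'
--     }
--     return {k: ('[HIDDEN]' if k in sensitive else v) for k, v in contact.items()}
-- ===== Notes on version B (the rewrite author's own statement) =====
-- stated objective: idiomatic
-- what changed: B builds the result in a single dict comprehension over contact.items() with a sensitive-field set, instead of copying the dict and mutating it in a loop over the fixed 10-field list; the iteration domain is the contact's keys, not the field list.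
import Mathlib
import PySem

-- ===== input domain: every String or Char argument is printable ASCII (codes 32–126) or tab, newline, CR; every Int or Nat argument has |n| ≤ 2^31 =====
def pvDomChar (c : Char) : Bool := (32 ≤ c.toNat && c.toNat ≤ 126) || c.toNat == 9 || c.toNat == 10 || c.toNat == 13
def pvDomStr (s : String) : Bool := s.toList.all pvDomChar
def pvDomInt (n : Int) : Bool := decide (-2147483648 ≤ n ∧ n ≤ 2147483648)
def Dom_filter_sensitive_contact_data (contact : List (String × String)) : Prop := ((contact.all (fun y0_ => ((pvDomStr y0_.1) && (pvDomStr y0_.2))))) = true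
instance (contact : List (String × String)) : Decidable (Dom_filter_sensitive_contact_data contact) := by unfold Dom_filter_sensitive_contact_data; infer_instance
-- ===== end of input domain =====

-- B replaces A's copy-then-mutate loop over the fixed field list by a single map over
-- the contact's own entries with a sensitive-field set (idiomatic; same cost).

-- ===== PORT A =====
def filter_sensitive_contact_data (contact : List (String × String)) : List (String × String) :=
  let sensitive_fields : List String :=
    ["email", "email2", "phone", "fax", "ident", "ident_type",
     "addr_street", "addr_city", "addr_zip", "notify_email"]
  let filtered := sensitive_fields.foldl
    (fun d field => if d.contains field then d.insert field "[HIDDEN]" else d)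
    (PySem.Dict.mk contact)
  filtered.items

-- ===== PORT B =====
def pvSensitiveSet : List String :=
  PySem.Set.ofList
    ["email", "email2", "phone", "fax", "ident", "ident_type",
     "addr_street", "addr_city", "addr_zip", "notify_email"]

def filter_sensitive_contact_data_alt (contact : List (String × String)) : List (String × String) :=
  contact.map (fun kv => (kv.1, if kv.1 ∈ pvSensitiveSet then "[HIDDEN]" else kv.2))

-- ===== PRECONDITION & SPEC =====
def Spec_filter_sensitive_contact_data (contact : List (String × String)) (out : List (String × String)) : Prop := out = filter_sensitive_contact_data_alt contact
instance (contact : List (String × String)) (out : List (String × String)) : Decidable (Spec_filter_sensitive_contact_data contact out) := by unfold Spec_filter_sensitive_contact_data; infer_instance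

-- ===== CLAIM (what is proved, stated in full; the proofs are below) =====
def Claim_equal_filter_sensitive_contact_data : Prop := ∀ (contact : List (String × String)), Dom_filter_sensitive_contact_data contact → Spec_filter_sensitive_contact_data contact (filter_sensitive_contact_data contact)

-- ===== LEMMAS AND PROOFS =====

-- One guarded-insert step of A's loop rewrites, on the items list, every entry whose key is `f`.
theorem pv_step_items (l : List (String × String)) (f : String) :
    ((if (PySem.Dict.mk l).contains f then (PySem.Dict.mk l).insert f "[HIDDEN]" else PySem.Dict.mk l) : PySem.Dict String String).items
      = l.map (fun p => if p.1 = f then (f, "[HIDDEN]") else p) := by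
  by_cases h : (PySem.Dict.mk l).contains f
  · simp only [h, if_true]
    rw [PySem.Dict.items_insert_of_contains _ _ h]
    apply List.map_congr_left
    intro p _
    by_cases hp : p.1 = f <;> simp [hp]
  · rw [if_neg h]
    have hnone : ∀ p ∈ l, p.1 ≠ f := by
      intro p hp hpf
      apply h
      rw [PySem.Dict.contains_iff_mem_keys]
      exact hpf ▸ List.mem_map_of_mem hp
    conv_lhs => rw [show (PySem.Dict.mk l).items = l from rfl]
    rw [List.map_congr_left (f := fun p => if p.1 = f then (f, "[HIDDEN]") else p) (g := id)]
    · simp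
    · intro p hp; simp [hnone p hp]

-- A's whole loop, on the items list, hides every key that occurs in the field list.
theorem pv_foldl_items (fs : List String) (l : List (String × String)) :
    ((fs.foldl (fun d field => if d.contains field then d.insert field "[HIDDEN]" else d) (PySem.Dict.mk l)) : PySem.Dict String String).items
      = l.map (fun p => if p.1 ∈ fs then (p.1, "[HIDDEN]") else p) := by
  induction fs generalizing l with
  | nil => simp
  | cons f fs ih =>
    rw [List.foldl_cons]
    have hstep : (if (PySem.Dict.mk l).contains f then (PySem.Dict.mk l).insert f "[HIDDEN]" else PySem.Dict.mk l)
        = PySem.Dict.mk (l.map (fun p => if p.1 = f then (f, "[HIDDEN]") else p)) := by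
      apply PySem.Dict.ext
      exact pv_step_items l f
    rw [hstep, ih, List.map_map]
    apply List.map_congr_left
    intro p _
    by_cases hpf : p.1 = f
    · simp [hpf]
    · by_cases hmem : p.1 ∈ fs <;> simp [hpf, hmem]

-- ===== VERDICT (by name: the statement is the Claim_ definition above) =====
theorem filter_sensitive_contact_data_spec : Claim_equal_filter_sensitive_contact_data := by
  intro contact _
  unfold Spec_filter_sensitive_contact_data filter_sensitive_contact_data filter_sensitive_contact_data_alt
  rw [pv_foldl_items]
  apply List.map_congr_left
  intro p _
  have hset : (p.1 ∈ pvSensitiveSet) ↔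
      p.1 ∈ (["email", "email2", "phone", "fax", "ident", "ident_type",
              "addr_street", "addr_city", "addr_zip", "notify_email"] : List String) := by
    unfold pvSensitiveSet
    exact PySem.Set.mem_ofList _ _
  by_cases hmem : p.1 ∈ (["email", "email2", "phone", "fax", "ident", "ident_type",
              "addr_street", "addr_city", "addr_zip", "notify_email"] : List String)
  · rw [if_pos hmem, if_pos (hset.mpr hmem)]
  · rw [if_neg hmem, if_neg (fun h => hmem (hset.mp h))]
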